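-- pv_equiv track=rewrite | github.com/BorisKin1957/Stepik_PROcode_200_plus | 4.2.10 - Кладовая времени.py | get_max_key
-- ===== SOURCE A (Python) =====
-- def get_max_key(dct: dict, num: int) -> str:
--     lst = []
--     for k in dct.keys():
--         if k <= num:
--             lst.append(k)
--     if lst:
--         return dct[max(lst)]
--     return None
-- ===== SOURCE B (Python) =====
-- def get_max_key(dct: dict, num: int) -> str:
--     best = None
--     for k, v in dct.items():
--         if k <= num and (best is None or k > best[0]):
--             best = (k, v)
--     return best[1] if best is not None else None
-- ===== Notes on version B (the rewrite author's own statement) =====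
-- stated objective: simpler
-- what changed: Replaces the collect-all-matching-keys list + max() + second dict lookup with a single pass that keeps a running (key, value) maximum, so no intermediate list and no final lookup.
import Mathlib
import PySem

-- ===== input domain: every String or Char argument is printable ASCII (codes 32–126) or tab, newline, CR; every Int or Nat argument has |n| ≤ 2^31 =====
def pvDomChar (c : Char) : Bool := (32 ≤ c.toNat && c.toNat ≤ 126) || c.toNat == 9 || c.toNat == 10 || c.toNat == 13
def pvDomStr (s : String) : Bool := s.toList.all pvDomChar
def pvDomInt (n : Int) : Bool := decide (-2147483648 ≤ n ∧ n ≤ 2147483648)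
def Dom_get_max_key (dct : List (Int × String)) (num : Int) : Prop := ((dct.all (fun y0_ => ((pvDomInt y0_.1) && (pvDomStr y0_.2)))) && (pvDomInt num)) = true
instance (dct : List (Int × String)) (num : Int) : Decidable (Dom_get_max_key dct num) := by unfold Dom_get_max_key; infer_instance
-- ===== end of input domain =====

-- B replaces A's collect-matching-keys list + max() + second dict lookup with a single-pass running (key, value) maximum: simpler, no intermediate list.


-- ===== PORT A =====
-- lst = [k for k in dct.keys() if k <= num]; if lst: return dct[max(lst)]; else: return None
def get_max_key (dct : List (Int × String)) (num : Int) : Option String :=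
  let lst := dct.foldl (fun acc kv => if kv.1 ≤ num then acc ++ [kv.1] else acc) ([] : List Int)
  match PySem.List.max? lst (fun x => x) with
  | some m => (PySem.Dict.mk dct).get? m
  | none => none

-- ===== PORT B =====
-- one step of B's loop body: 'if k <= num and (best is None or k > best[0]): best = (k, v)'
def pvStepB (num : Int) (best : Option (Int × String)) (kv : Int × String) : Option (Int × String) :=
  match best with
  | none => if kv.1 ≤ num then some kv else none
  | some b => if kv.1 ≤ num ∧ b.1 < kv.1 then some kv else some b

def get_max_key_alt (dct : List (Int × String)) (num : Int) : Option String :=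
  (dct.foldl (pvStepB num) none).map (·.2)

-- ===== PRECONDITION & SPEC =====
def Spec_get_max_key (dct : List (Int × String)) (num : Int) (out : Option String) : Prop := out = get_max_key_alt dct num
instance (dct : List (Int × String)) (num : Int) (out : Option String) : Decidable (Spec_get_max_key dct num out) := by unfold Spec_get_max_key; infer_instance

-- ===== CLAIM (what is proved, stated in full; the proofs are below) =====
def Claim_equal_get_max_key : Prop := ∀ (dct : List (Int × String)) (num : Int), Dom_get_max_key dct num → Spec_get_max_key dct num (get_max_key dct num)

-- ===== LEMMAS AND PROOFS =====

-- merge of two running-max candidates (proof helper; keeps the LEFT pair on a tie)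
def pvMerge (b r : Option (Int × String)) : Option (Int × String) :=
  match b, r with
  | none, r => r
  | some p, none => some p
  | some p, some q => if p.1 < q.1 then some q else some p

theorem pvStepB_eq_merge (num : Int) (b : Option (Int × String)) (kv : Int × String) :
    pvStepB num b kv = pvMerge b (pvStepB num none kv) := by
  cases b <;> simp only [pvStepB, pvMerge] <;> split_ifs <;> simp_all

theorem pvMerge_assoc (a b c : Option (Int × String)) :
    pvMerge (pvMerge a b) c = pvMerge a (pvMerge b c) := by
  rcases a with _ | pa <;> rcases b with _ | pb <;> rcases c with _ | pc <;>
    simp only [pvMerge] <;> split_ifs <;>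
    simp_all only [] <;> split_ifs <;> simp_all <;> omega

theorem foldl_pvStepB_init (num : Int) (l : List (Int × String)) (b : Option (Int × String)) :
    l.foldl (pvStepB num) b = pvMerge b (l.foldl (pvStepB num) none) := by
  induction l generalizing b with
  | nil => cases b <;> simp [pvMerge]
  | cons kv t ih =>
    simp only [List.foldl_cons]
    rw [ih (pvStepB num b kv), ih (pvStepB num none kv),
        pvStepB_eq_merge num b kv, pvMerge_assoc]

-- recursive characterisation of B's loop
def pvBest (num : Int) : List (Int × String) → Option (Int × String)
  | [] => none
  | kv :: t => if kv.1 ≤ num then pvMerge (some kv) (pvBest num t) else pvBest num t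

theorem foldl_pvStepB_eq_pvBest (num : Int) (l : List (Int × String)) :
    l.foldl (pvStepB num) none = pvBest num l := by
  induction l with
  | nil => rfl
  | cons kv t ih =>
    simp only [List.foldl_cons, pvBest]
    rw [foldl_pvStepB_init num t (pvStepB num none kv), ih]
    by_cases h : kv.1 ≤ num <;> simp [pvStepB, pvMerge, h]

theorem foldl_max_init (l : List Int) (a b : Int) :
    List.foldl max (max a b) l = max a (List.foldl max b l) := by
  induction l generalizing b with
  | nil => rfl
  | cons x t ih => simp only [List.foldl_cons, max_assoc, ih]

theorem get?_mk_isSome (t : List (Int × String)) (m : Int)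
    (h : ∃ kv ∈ t, kv.1 = m) : ∃ v, (PySem.Dict.mk t).get? m = some v := by
  induction t with
  | nil => simp at h
  | cons kv t ih =>
    rw [PySem.Dict.get?_mk_cons]
    by_cases hk : kv.1 == m
    · simp [hk]
    · simp only [hk]
      apply ih
      rcases h with ⟨p, hp, hpm⟩
      rcases List.mem_cons.mp hp with rfl | hpt
      · exact absurd (by simp [hpm]) hk
      · exact ⟨p, hpt, hpm⟩

theorem mem_fk_le (num : Int) (t : List (Int × String)) (m : Int)
    (h : m ∈ (t.filter (fun kv => decide (kv.1 ≤ num))).map (·.1)) : m ≤ num := by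
  rcases List.mem_map.mp h with ⟨p, hp, hpm⟩
  have := List.of_mem_filter hp
  simp at this
  omega

-- Main: pvBest is (largest key ≤ num, its first value in the dict), or none
theorem pvBest_eq_max (num : Int) (t : List (Int × String)) :
    pvBest num t =
      match PySem.List.max? ((t.filter (fun kv => decide (kv.1 ≤ num))).map (·.1)) (fun x => x) with
      | some m => ((PySem.Dict.mk t).get? m).map (fun v => (m, v))
      | none => none := by
  induction t with
  | nil => rfl
  | cons kv t ih =>
    obtain ⟨k0, v0⟩ := kv
    by_cases h : k0 ≤ num
    · have hfk : List.filter (fun kv => decide (kv.1 ≤ num)) ((k0, v0) :: t)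
          = (k0, v0) :: t.filter (fun kv => decide (kv.1 ≤ num)) := by simp [h]
      rw [pvBest, if_pos h, hfk, List.map_cons, PySem.List.max?_id_cons, ih]
      cases hm : PySem.List.max? ((t.filter (fun kv => decide (kv.1 ≤ num))).map (·.1)) (fun x => x) with
      | none =>
        have hnil : (t.filter (fun kv => decide (kv.1 ≤ num))).map (·.1) = [] :=
          (PySem.List.max?_eq_none_iff _ _).1 hm
        simp [hnil, pvMerge, PySem.Dict.get?_mk_cons]
      | some m =>
        have hmem := PySem.List.max?_mem hm
        have hsome : ∃ v, (PySem.Dict.mk t).get? m = some v := by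
          apply get?_mk_isSome
          rcases List.mem_map.mp hmem with ⟨p, hp, hpm⟩
          exact ⟨p, List.mem_of_mem_filter hp, hpm⟩
        rcases hsome with ⟨v, hv⟩
        rcases hne : (t.filter (fun kv => decide (kv.1 ≤ num))).map (·.1) with _ | ⟨h0, tt⟩
        · rw [hne] at hm; simp [PySem.List.max?] at hm
        · rw [hne] at hm ⊢
          rw [PySem.List.max?_id_cons] at hm
          have hK : List.foldl max k0 (h0 :: tt) = max k0 m := by
            simp only [List.foldl_cons]
            rw [show List.foldl max (max k0 h0) tt = max k0 (List.foldl max h0 tt) from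
              foldl_max_init tt k0 h0]
            have hm' : List.foldl max h0 tt = m := by simpa using hm
            rw [hm']
          simp only [List.foldl_cons] at hK ⊢
          rw [hK, hv]
          by_cases ck : k0 < m
          · have : max k0 m = m := max_eq_right (le_of_lt ck)
            rw [this]
            have hne2 : (k0 == m) = false := by simp; omega
            simp [pvMerge, ck, PySem.Dict.get?_mk_cons, hne2, hv]
          · have : max k0 m = k0 := max_eq_left (by omega)
            rw [this]
            simp [pvMerge, ck, PySem.Dict.get?_mk_cons]
    · have hfk : List.filter (fun kv => decide (kv.1 ≤ num)) ((k0, v0) :: t)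
          = t.filter (fun kv => decide (kv.1 ≤ num)) := by simp [h]
      rw [pvBest, if_neg h, hfk, ih]
      cases hm : PySem.List.max? ((t.filter (fun kv => decide (kv.1 ≤ num))).map (·.1)) (fun x => x) with
      | none => rfl
      | some m =>
        have hle : m ≤ num := mem_fk_le num t m (PySem.List.max?_mem hm)
        have hne2 : (k0 == m) = false := by simp; omega
        simp [PySem.Dict.get?_mk_cons, hne2]

-- ===== VERDICT (by name: the statement is the Claim_ definition above) =====
theorem get_max_key_spec : Claim_equal_get_max_key := by
  intro dct num _
  show get_max_key dct num = get_max_key_alt dct num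
  unfold get_max_key get_max_key_alt
  rw [foldl_pvStepB_eq_pvBest, pvBest_eq_max]
  have hl : List.foldl (fun acc kv => if kv.1 ≤ num then acc ++ [kv.1] else acc)
      ([] : List Int) dct = (dct.filter (fun kv => decide (kv.1 ≤ num))).map (·.1) := by
    rw [PySem.List.foldl_append_ite (fun kv : Int × String => kv.1 ≤ num) (fun kv : Int × String => kv.1)]
    simp
  simp only [hl]
  cases PySem.List.max? ((List.filter (fun kv => decide (kv.1 ≤ num)) dct).map (fun x => x.1)) (fun x => x) with
  | none => rfl
  | some m => cases hg : (PySem.Dict.mk dct).get? m <;> simp [hg]
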